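-- pv_equiv track=rewrite | github.com/v1shJ/Backups | Competitive Programming/CodeForces/170/Cprac.py | solve
-- ===== SOURCE A (Python) =====
-- from collections import Counter
--
-- def solve(n, k, cards):
--     # Count frequencies of each number on the cards
--     freq = Counter(cards)
--     # Extract unique values and sort them
--     unique_values = sorted(freq.keys())
--
--     max_cards = 0
--     left = 0
--     total_cards = 0
--
--     for right in range(len(unique_values)):
--         total_cards += freq[unique_values[right]]
--
--         # Maintain the count of distinct numbers within the limit of k
--         while (right - left + 1 > k) or (unique_values[right] - unique_values[left] > 1):
--             total_cards -= freq[unique_values[left]]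
--             left += 1
--
--         # Update the maximum cards taken
--         max_cards = max(max_cards, total_cards)
--
--     return max_cards
-- ===== SOURCE B (Python) =====
-- from collections import Counter
--
-- def solve(n, k, cards):
--     # One pass over the distinct values: with at most k distinct values allowed
--     # and a span of at most 1, the best pick is a value v together with v+1
--     # (the latter only when k >= 2). No sorting needed.
--     if k <= 0:
--         return 0
--     freq = Counter(cards)
--     best = 0
--     for v, c in freq.items():
--         take = c + (freq.get(v + 1, 0) if k >= 2 else 0)
--         if take > best:
--             best = take
--     return best
-- ===== Notes on version B (the rewrite author's own statement) =====
-- stated objective: faster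
-- what changed: Replaces the sort + sliding-window over sorted distinct values by a single unsorted pass over the Counter: since the window may span values v and v+1 only, the answer is max(freq[v] + (freq[v+1] if k>=2 else 0)) over the distinct values.
import Mathlib
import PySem

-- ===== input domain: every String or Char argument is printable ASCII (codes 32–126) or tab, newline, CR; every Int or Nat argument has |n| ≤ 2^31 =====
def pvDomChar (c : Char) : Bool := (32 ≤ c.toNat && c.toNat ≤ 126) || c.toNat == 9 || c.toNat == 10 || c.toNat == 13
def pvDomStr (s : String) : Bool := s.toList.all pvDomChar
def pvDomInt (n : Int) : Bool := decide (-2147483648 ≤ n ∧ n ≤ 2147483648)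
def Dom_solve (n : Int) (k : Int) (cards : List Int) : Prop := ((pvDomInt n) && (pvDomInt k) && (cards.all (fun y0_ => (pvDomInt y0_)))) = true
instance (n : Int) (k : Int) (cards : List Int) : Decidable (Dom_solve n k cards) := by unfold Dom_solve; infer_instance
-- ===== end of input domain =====

-- B replaces A's sort + sliding window over the sorted distinct values by one
-- unsorted pass over the Counter (the window never spans more than the values
-- v and v+1), an asymptotic speed-up; equivalence is proved on Pre_solve.


-- ===== PORT A =====
-- A's inner 'while': shrink the window from the left.  'fuel' only bounds the
-- recursion; inside Pre_solve the loop exits before the fuel runs out, and the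
-- pyGetD default 0 is only reached where Python would raise IndexError
-- (outside Pre_solve).
def solveShrink (uv : List Int) (freq : PySem.Dict Int Int) (k right : Int) :
    Nat → Int × Int → Int × Int
  | 0, st => st
  | fuel + 1, (left, tc) =>
    if right - left + 1 > k ∨ PySem.List.pyGetD uv right 0 - PySem.List.pyGetD uv left 0 > 1 then
      solveShrink uv freq k right fuel
        (left + 1, tc - freq.getD (PySem.List.pyGetD uv left 0) 0)
    else (left, tc)

def solve (n : Int) (k : Int) (cards : List Int) : Int :=
  let freq := PySem.Dict.counter cards
  let uv := PySem.List.sorted freq.keys (fun x => x) false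
  ((PySem.List.pyRange 0 uv.length 1).foldl
    (fun (st : Int × Int × Int) right =>
      let tc := st.2.2 + freq.getD (PySem.List.pyGetD uv right 0) 0
      let lt := solveShrink uv freq k right (uv.length + 1) (st.2.1, tc)
      (max st.1 lt.2, lt.1, lt.2))
    (0, 0, 0)).1

-- ===== PORT B =====
def solve_alt (n : Int) (k : Int) (cards : List Int) : Int :=
  if k ≤ 0 then 0
  else
    let freq := PySem.Dict.counter cards
    freq.items.foldl
      (fun best (vc : Int × Int) =>
        let take := vc.2 + (if 2 ≤ k then freq.getD (vc.1 + 1) 0 else 0)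
        if take > best then take else best)
      0

-- ===== PRECONDITION & SPEC =====
-- Pre_solve excludes k ≤ 0 with a nonempty card list: there A's shrink loop
-- walks the left pointer off the list and raises IndexError.
def Pre_solve (n : Int) (k : Int) (cards : List Int) : Prop := 1 ≤ k ∨ cards = []
instance (n : Int) (k : Int) (cards : List Int) : Decidable (Pre_solve n k cards) := by unfold Pre_solve; infer_instance
def pvWitness_solve : Int × Int × List Int := (5, 2, [1, 2, 2, 3, 5])

def Spec_solve (n : Int) (k : Int) (cards : List Int) (out : Int) : Prop := out = solve_alt n k cards
instance (n : Int) (k : Int) (cards : List Int) (out : Int) : Decidable (Spec_solve n k cards out) := by unfold Spec_solve; infer_instance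

-- ===== CLAIM (what is proved, stated in full; the proofs are below) =====
def Claim_equal_solve : Prop := ∀ (n : Int) (k : Int) (cards : List Int), Dom_solve n k cards → Pre_solve n k cards → Spec_solve n k cards (solve n k cards)

-- ===== LEMMAS AND PROOFS =====

-- the count of v in cards, as an Int
def pvCnt (cards : List Int) (v : Int) : Int := (cards.count v : Int)

-- the value B maximises at a distinct value v
def pvBterm (cards : List Int) (k v : Int) : Int :=
  pvCnt cards v + (if 2 ≤ k then pvCnt cards (v + 1) else 0)

-- pvPair uv k r: A's window ending at index r also keeps index r-1
-- (an abbrev, so the Decidable instance of the conjunction applies directly)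
abbrev pvPair (uv : List Int) (k : Int) (r : Nat) : Prop :=
  2 ≤ k ∧ 1 ≤ r ∧ uv.getD (r - 1) 0 + 1 = uv.getD r 0

-- A's window sum after the shrink at index r
def pvAterm (cards uv : List Int) (k : Int) (r : Nat) : Int :=
  pvCnt cards (uv.getD r 0) + (if pvPair uv k r then pvCnt cards (uv.getD (r - 1) 0) else 0)

-- the sorted distinct values A iterates over
def pvUV (cards : List Int) : List Int :=
  PySem.List.sorted (PySem.Set.ofList cards) (fun x => x) false

lemma pvUV_lt (cards : List Int) {i j : Nat} (hij : i < j) (hj : j < (pvUV cards).length) :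
    (pvUV cards).getD i 0 < (pvUV cards).getD j 0 := by
  have hs := PySem.List.sorted_ofList_pairwise_lt (κ := Int) cards
  rw [List.pairwise_iff_getElem] at hs
  have hi : i < (pvUV cards).length := lt_trans hij hj
  rw [List.getD_eq_getElem _ _ hi, List.getD_eq_getElem _ _ hj]
  exact hs i j hi hj hij

lemma mem_pvUV (cards : List Int) (v : Int) : v ∈ pvUV cards ↔ v ∈ cards := by
  rw [pvUV, PySem.List.mem_sorted, PySem.Set.mem_ofList]

-- 0 ≤ pvCnt
lemma pvCnt_nonneg (cards : List Int) (v : Int) : 0 ≤ pvCnt cards v := Int.natCast_nonneg _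

-- fold (List.count v cards : Int) back into pvCnt
lemma pvCnt_def (cards : List Int) (v : Int) : ((List.count v cards : Nat) : Int) = pvCnt cards v := rfl

-- the body of A's outer loop (definitionally the lambda inside solve)
def pvBody (cards : List Int) (k : Int) (st : Int × Int × Int) (right : Int) : Int × Int × Int :=
  let tc := st.2.2 + (PySem.Dict.counter cards).getD (PySem.List.pyGetD (pvUV cards) right 0) 0
  let lt := solveShrink (pvUV cards) (PySem.Dict.counter cards) k right ((pvUV cards).length + 1) (st.2.1, tc)
  (max st.1 lt.2, lt.1, lt.2)

-- one unfolding of solveShrink (definitional)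
lemma solveShrink_succ (uv : List Int) (freq : PySem.Dict Int Int) (k right : Int)
    (f : Nat) (left tc : Int) :
    solveShrink uv freq k right (f + 1) (left, tc) =
      if right - left + 1 > k ∨ PySem.List.pyGetD uv right 0 - PySem.List.pyGetD uv left 0 > 1
      then solveShrink uv freq k right f
        (left + 1, tc - freq.getD (PySem.List.pyGetD uv left 0) 0)
      else (left, tc) := rfl

-- the middle of the shrink: window is {r-1, r}; finishes in ≤ 2 more rounds
lemma shrinkMid (cards : List Int) (k : Int) (r : Nat) (fuel : Nat)
    (hk : 1 ≤ k) (hr : r < (pvUV cards).length) (h1 : 1 ≤ r) (hfuel : 2 ≤ fuel) :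
    solveShrink (pvUV cards) (PySem.Dict.counter cards) k (r : Int) fuel
      ((r : Int) - 1, pvCnt cards ((pvUV cards).getD (r-1) 0) + pvCnt cards ((pvUV cards).getD r 0))
    = ((r : Int) - (if pvPair (pvUV cards) k r then 1 else 0), pvAterm cards (pvUV cards) k r) := by
  obtain ⟨g, rfl⟩ : ∃ g, fuel = g + 1 + 1 := ⟨fuel - 2, by omega⟩
  have e1 : (r : Int) - 1 = ((r - 1 : Nat) : Int) := by omega
  have hlt := pvUV_lt cards (show r - 1 < r by omega) hr
  rw [solveShrink_succ, e1, PySem.List.pyGetD_natCast, PySem.List.pyGetD_natCast,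
    PySem.Dict.getD_counter, pvCnt_def]
  by_cases hp : pvPair (pvUV cards) k r
  · rw [if_neg (by
      obtain ⟨hk2, -, heq⟩ := hp
      omega)]
    rw [if_pos hp]
    unfold pvAterm
    rw [if_pos hp]
    simp only [Prod.mk.injEq]
    exact ⟨by omega, by ring⟩
  · have hnp : ¬(2 ≤ k) ∨ (pvUV cards).getD (r-1) 0 + 1 ≠ (pvUV cards).getD r 0 := by
      rcases Decidable.em (2 ≤ k) with h2k | h2k
      · rcases Decidable.em ((pvUV cards).getD (r-1) 0 + 1 = (pvUV cards).getD r 0) with he | he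
        · exact absurd ⟨h2k, h1, he⟩ hp
        · exact Or.inr he
      · exact Or.inl h2k
    rw [if_pos (by omega)]
    have e2 : ((r - 1 : Nat) : Int) + 1 = (r : Int) := by omega
    have e3 : pvCnt cards ((pvUV cards).getD (r-1) 0) + pvCnt cards ((pvUV cards).getD r 0)
        - pvCnt cards ((pvUV cards).getD (r-1) 0) = pvCnt cards ((pvUV cards).getD r 0) := by ring
    rw [e2, e3]
    rw [solveShrink_succ, PySem.List.pyGetD_natCast]
    rw [if_neg (by omega)]
    rw [if_neg hp]
    unfold pvAterm
    rw [if_neg hp]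
    simp only [Prod.mk.injEq]
    exact ⟨by omega, by ring⟩

-- the full shrink at index r, from the state the outer loop hands it
lemma shrinkA (cards : List Int) (k : Int) (r : Nat) (fuel : Nat) (left tc : Int)
    (hk : 1 ≤ k) (hr : r < (pvUV cards).length) (hfuel : r + 2 ≤ fuel)
    (hinv : (r = 0 ∧ left = 0 ∧ tc = pvCnt cards ((pvUV cards).getD 0 0)) ∨
            (1 ≤ r ∧ left = (r : Int) - 1 - (if pvPair (pvUV cards) k (r-1) then 1 else 0) ∧
             tc = pvAterm cards (pvUV cards) k (r-1) + pvCnt cards ((pvUV cards).getD r 0))) :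
    solveShrink (pvUV cards) (PySem.Dict.counter cards) k (r : Int) fuel (left, tc)
    = ((r : Int) - (if pvPair (pvUV cards) k r then 1 else 0), pvAterm cards (pvUV cards) k r) := by
  rcases hinv with ⟨h0, hl, ht⟩ | ⟨h1, hl, ht⟩
  · subst h0 hl ht
    obtain ⟨f, rfl⟩ : ∃ f, fuel = f + 1 := ⟨fuel - 1, by omega⟩
    rw [solveShrink_succ, PySem.List.pyGetD_natCast]
    have e0l : PySem.List.pyGetD (pvUV cards) (0 : Int) 0 = (pvUV cards).getD 0 0 := by
      simpa using PySem.List.pyGetD_natCast (pvUV cards) 0 0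
    rw [e0l]
    rw [if_neg (by omega)]
    have hp0 : ¬ pvPair (pvUV cards) k 0 := fun hp => absurd hp.2.1 (by omega)
    rw [if_neg hp0]
    unfold pvAterm
    rw [if_neg hp0]
    simp only [Prod.mk.injEq]
    exact ⟨by omega, by ring⟩
  · by_cases hpp : pvPair (pvUV cards) k (r - 1)
    · have h2 : 2 ≤ r := by
        have := hpp.2.1; omega
      have e3 : r - 1 - 1 = r - 2 := by omega
      have hk2 := hpp.1
      have heq : (pvUV cards).getD (r-2) 0 + 1 = (pvUV cards).getD (r-1) 0 := by
        have h := hpp.2.2; rwa [e3] at h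
      have hlt1 := pvUV_lt cards (show r - 1 < r by omega) hr
      have ha : pvAterm cards (pvUV cards) k (r-1)
          = pvCnt cards ((pvUV cards).getD (r-1) 0) + pvCnt cards ((pvUV cards).getD (r-2) 0) := by
        unfold pvAterm
        rw [if_pos hpp, e3]
      subst hl ht
      rw [if_pos hpp, ha]
      obtain ⟨f, rfl⟩ : ∃ f, fuel = f + 1 := ⟨fuel - 1, by omega⟩
      rw [solveShrink_succ]
      have e2 : (r : Int) - 1 - 1 = ((r - 2 : Nat) : Int) := by omega
      rw [e2, PySem.List.pyGetD_natCast, PySem.List.pyGetD_natCast,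
        PySem.Dict.getD_counter, pvCnt_def]
      rw [if_pos (by omega)]
      have e4 : ((r - 2 : Nat) : Int) + 1 = (r : Int) - 1 := by omega
      have e5 : pvCnt cards ((pvUV cards).getD (r-1) 0) + pvCnt cards ((pvUV cards).getD (r-2) 0)
            + pvCnt cards ((pvUV cards).getD r 0) - pvCnt cards ((pvUV cards).getD (r-2) 0)
          = pvCnt cards ((pvUV cards).getD (r-1) 0) + pvCnt cards ((pvUV cards).getD r 0) := by ring
      rw [e4, e5]
      exact shrinkMid cards k r f hk hr (by omega) (by omega)
    · have ha : pvAterm cards (pvUV cards) k (r-1)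
          = pvCnt cards ((pvUV cards).getD (r-1) 0) := by
        unfold pvAterm
        rw [if_neg hpp, add_zero]
      subst hl ht
      rw [if_neg hpp, sub_zero, ha]
      exact shrinkMid cards k r fuel hk hr h1 (by omega)

-- one outer-loop step, from the state the invariant describes
lemma pvBody_step (cards : List Int) (k : Int) (r : Nat) (hk : 1 ≤ k)
    (hr : r < (pvUV cards).length) (mc left tc : Int)
    (hinv : (r = 0 ∧ left = 0 ∧ tc = 0) ∨
            (1 ≤ r ∧ left = (r : Int) - 1 - (if pvPair (pvUV cards) k (r-1) then 1 else 0) ∧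
             tc = pvAterm cards (pvUV cards) k (r-1))) :
    pvBody cards k (mc, left, tc) (r : Int)
    = (max mc (pvAterm cards (pvUV cards) k r),
       (r : Int) - (if pvPair (pvUV cards) k r then 1 else 0),
       pvAterm cards (pvUV cards) k r) := by
  unfold pvBody
  simp only [PySem.List.pyGetD_natCast, PySem.Dict.getD_counter, pvCnt_def]
  rw [shrinkA cards k r ((pvUV cards).length + 1) left
      (tc + pvCnt cards ((pvUV cards).getD r 0)) hk hr (by omega) ?_]
  · rcases hinv with ⟨h0, hl, ht⟩ | ⟨h1, hl, ht⟩
    · subst h0 hl ht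
      exact Or.inl ⟨rfl, rfl, by ring⟩
    · exact Or.inr ⟨h1, hl, by rw [ht]⟩

-- A's outer loop accumulates the running max of pvAterm
lemma loopA (cards : List Int) (k : Int) (hk : 1 ≤ k) :
    ∀ (m r : Nat), r + m = (pvUV cards).length →
    ∀ (mc left tc : Int),
      ((r = 0 ∧ left = 0 ∧ tc = 0) ∨
       (1 ≤ r ∧ left = (r : Int) - 1 - (if pvPair (pvUV cards) k (r-1) then 1 else 0) ∧
        tc = pvAterm cards (pvUV cards) k (r-1))) →
      ((PySem.List.pyRange (r : Int) ((pvUV cards).length : Int) 1).foldl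
        (pvBody cards k) (mc, left, tc)).1
      = (((List.range (pvUV cards).length).drop r).map (pvAterm cards (pvUV cards) k)).foldl max mc := by
  intro m
  induction m with
  | zero =>
    intro r hlen mc left tc hinv
    rw [PySem.List.pyRange_one_eq_nil (by omega : ((pvUV cards).length : Int) ≤ (r : Int))]
    rw [List.foldl_nil]
    have hdrop : (List.range (pvUV cards).length).drop r = [] := by
      rw [List.drop_eq_nil_iff]
      simp only [List.length_range]
      omega
    rw [hdrop, List.map_nil, List.foldl_nil]
  | succ m ih =>
    intro r hlen mc left tc hinv
    have hr : r < (pvUV cards).length := by omega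
    rw [PySem.List.pyRange_one_cons (by omega : (r : Int) < ((pvUV cards).length : Int))]
    rw [List.foldl_cons]
    rw [pvBody_step cards k r hk hr mc left tc hinv]
    have hc : (r : Int) + 1 = ((r + 1 : Nat) : Int) := by omega
    rw [hc]
    have hstep := ih (r + 1) (by omega)
      (max mc (pvAterm cards (pvUV cards) k r))
      ((r : Int) - (if pvPair (pvUV cards) k r then 1 else 0))
      (pvAterm cards (pvUV cards) k r)
      (Or.inr ⟨by omega, by push_cast; ring_nf, rfl⟩)
    rw [hstep]
    have hdrop : (List.range (pvUV cards).length).drop r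
        = r :: (List.range (pvUV cards).length).drop (r + 1) := by
      rw [List.drop_eq_getElem_cons (by simpa using hr)]
      rw [List.getElem_range]
    rw [hdrop, List.map_cons, List.foldl_cons]

-- A's result is the max of the pvAterm values
lemma afold (n k : Int) (cards : List Int) (hk : 1 ≤ k) :
    solve n k cards
      = (((List.range (pvUV cards).length).map (pvAterm cards (pvUV cards) k)).foldl max 0) := by
  have huv : PySem.List.sorted (PySem.Dict.counter cards).keys (fun x => x) false = pvUV cards := by
    rw [PySem.Dict.keys_counter]
    rfl
  unfold solve
  simp only [huv]
  have := loopA cards k hk (pvUV cards).length 0 (by omega) 0 0 0 (Or.inl ⟨rfl, rfl, rfl⟩)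
  simp only [Nat.cast_zero, List.drop_zero] at this
  exact this

-- B's result is the max of the pvBterm values
lemma bfold (n k : Int) (cards : List Int) (hk : 1 ≤ k) :
    solve_alt n k cards
      = (((PySem.Set.ofList cards).map (pvBterm cards k)).foldl max 0) := by
  unfold solve_alt
  rw [if_neg (by omega : ¬ k ≤ 0)]
  rw [List.foldl_map]
  simp only [PySem.Dict.items_counter, List.foldl_map, PySem.Dict.getD_counter, gt_iff_lt]
  congr 1
  funext best v
  unfold pvBterm pvCnt
  split <;> omega

-- two lists dominating each other have the same running max from 0
lemma foldl_max_eq_of_dominates (l1 l2 : List Int)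
    (h12 : ∀ x ∈ l1, ∃ y ∈ l2, x ≤ y) (h21 : ∀ y ∈ l2, ∃ x ∈ l1, y ≤ x) :
    l1.foldl max 0 = l2.foldl max 0 := by
  apply le_antisymm
  · rcases PySem.List.foldl_max_mem l1 0 with h | h
    · rw [h]; exact (PySem.List.le_foldl_max l2 0).1
    · rcases h12 _ h with ⟨y, hy, hxy⟩
      exact le_trans hxy ((PySem.List.le_foldl_max l2 0).2 y hy)
  · rcases PySem.List.foldl_max_mem l2 0 with h | h
    · rw [h]; exact (PySem.List.le_foldl_max l1 0).1
    · rcases h21 _ h with ⟨x, hx, hyx⟩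
      exact le_trans hyx ((PySem.List.le_foldl_max l1 0).2 x hx)

-- every pvAterm is matched by a pvBterm
lemma aterm_le (cards : List Int) (k : Int) (r : Nat) (hr : r < (pvUV cards).length) :
    ∃ v ∈ pvUV cards, pvAterm cards (pvUV cards) k r ≤ pvBterm cards k v := by
  by_cases hp : pvPair (pvUV cards) k r
  · refine ⟨(pvUV cards).getD (r-1) 0, ?_, ?_⟩
    · rw [List.getD_eq_getElem _ _ (by omega : r - 1 < (pvUV cards).length)]
      exact List.getElem_mem _
    · obtain ⟨hk2, h1r, heq⟩ := hp
      unfold pvAterm pvBterm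
      rw [if_pos ⟨hk2, h1r, heq⟩, if_pos hk2, heq]
      omega
  · refine ⟨(pvUV cards).getD r 0, ?_, ?_⟩
    · rw [List.getD_eq_getElem _ _ hr]
      exact List.getElem_mem _
    · unfold pvAterm pvBterm
      rw [if_neg hp]
      have h1 := pvCnt_nonneg cards ((pvUV cards).getD r 0 + 1)
      split <;> omega

-- every pvBterm is matched by a pvAterm
lemma bterm_le (cards : List Int) (k : Int) (v : Int) (hv : v ∈ pvUV cards) :
    ∃ r < (pvUV cards).length, pvBterm cards k v ≤ pvAterm cards (pvUV cards) k r := by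
  obtain ⟨r0, hr0, hv0⟩ := List.mem_iff_getElem.mp hv
  have hv0' : (pvUV cards).getD r0 0 = v := by
    rw [List.getD_eq_getElem _ _ hr0]; exact hv0
  by_cases hk2 : 2 ≤ k
  · by_cases hmem : (v + 1) ∈ pvUV cards
    · obtain ⟨j, hj, hj0⟩ := List.mem_iff_getElem.mp hmem
      have hj0' : (pvUV cards).getD j 0 = v + 1 := by
        rw [List.getD_eq_getElem _ _ hj]; exact hj0
      have hgt : r0 < j := by
        by_contra hle
        rcases Nat.lt_or_ge j r0 with hlt | hge
        · have := pvUV_lt cards hlt hr0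
          omega
        · have : j = r0 := by omega
          subst this
          omega
      have hj1 : j = r0 + 1 := by
        by_contra hne
        have h2 : r0 + 1 < j := by omega
        have hb1 := pvUV_lt cards (show r0 < r0 + 1 by omega) (by omega : r0 + 1 < (pvUV cards).length)
        have hb2 := pvUV_lt cards h2 hj
        omega
      subst hj1
      refine ⟨r0 + 1, hj, ?_⟩
      have hpair : pvPair (pvUV cards) k (r0 + 1) := by
        refine ⟨hk2, by omega, ?_⟩
        have : r0 + 1 - 1 = r0 := rfl
        rw [this, hv0', hj0']
      unfold pvBterm pvAterm
      rw [if_pos hk2, if_pos hpair]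
      have : r0 + 1 - 1 = r0 := rfl
      rw [this, hv0', hj0']
      omega
    · refine ⟨r0, hr0, ?_⟩
      have hz : cards.count (v + 1) = 0 := by
        apply List.count_eq_zero_of_not_mem
        rw [← mem_pvUV cards]
        exact hmem
      unfold pvBterm pvAterm pvCnt
      rw [if_pos hk2, hz]
      simp only [hv0']
      split <;> simp
  · refine ⟨r0, hr0, ?_⟩
    unfold pvBterm pvAterm
    rw [if_neg hk2]
    simp only [hv0']
    have h1 := pvCnt_nonneg cards ((pvUV cards).getD (r0 - 1) 0)
    split <;> omega

lemma max_eq (cards : List Int) (k : Int) :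
    (((List.range (pvUV cards).length).map (pvAterm cards (pvUV cards) k)).foldl max 0)
    = (((PySem.Set.ofList cards).map (pvBterm cards k)).foldl max 0) := by
  apply foldl_max_eq_of_dominates
  · intro x hx
    rw [List.mem_map] at hx
    obtain ⟨r, hr, rfl⟩ := hx
    rw [List.mem_range] at hr
    obtain ⟨v, hv, hle⟩ := aterm_le cards k r hr
    refine ⟨pvBterm cards k v, List.mem_map.mpr ⟨v, ?_, rfl⟩, hle⟩
    rw [pvUV, PySem.List.mem_sorted] at hv
    exact hv
  · intro y hy
    rw [List.mem_map] at hy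
    obtain ⟨v, hv, rfl⟩ := hy
    have hv' : v ∈ pvUV cards := by
      rw [pvUV, PySem.List.mem_sorted]; exact hv
    obtain ⟨r, hr, hle⟩ := bterm_le cards k v hv'
    exact ⟨pvAterm cards (pvUV cards) k r, List.mem_map.mpr ⟨r, List.mem_range.mpr hr, rfl⟩, hle⟩

-- ===== VERDICT =====
theorem solve_spec : Claim_equal_solve := by
  intro n k cards _ hpre
  unfold Spec_solve
  by_cases hk : 1 ≤ k
  · rw [afold n k cards hk, bfold n k cards hk, max_eq cards k]
  · have hc : cards = [] := by
      rcases hpre with h | h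
      · omega
      · exact h
    subst hc
    have ha : solve n k [] = 0 := rfl
    rw [ha]
    unfold solve_alt
    split
    · rfl
    · rfl
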